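-- pv_equiv track=rewrite | github.com/R00T-Kim/SCOUT | src/aiedge/stage.py | _combine_status
-- ===== SOURCE A (Python) =====
-- from collections.abc import Sequence
-- from typing import Any, Literal, Protocol, cast
--
-- StageStatus = Literal["ok", "partial", "failed", "skipped"]
--
-- def _combine_status(statuses: Sequence[StageStatus]) -> StageStatus:
--     if not statuses:
--         return "skipped"
--     if all(s == "skipped" for s in statuses):
--         return "skipped"
--     if any(s in ("failed", "partial") for s in statuses):
--         return "partial"
--     return "ok"
-- ===== SOURCE B (Python) =====
-- def _combine_status(statuses):
--     # single pass: maximum severity rank, then decode (skipped<ok<partial)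
--     level = 0
--     for s in statuses:
--         if s in ("failed", "partial"):
--             r = 2
--         elif s == "skipped":
--             r = 0
--         else:
--             r = 1
--         if r > level:
--             level = r
--     return ("skipped", "ok", "partial")[level]
-- ===== Notes on version B (the rewrite author's own statement) =====
-- stated objective: alternative
-- what changed: Replaces the three staged all/any scans by a single left-to-right pass that folds each status to a numeric severity rank (skipped=0, other=1, failed/partial=2), keeps the running maximum, and decodes the maximum back to a status.
import Mathlib
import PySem

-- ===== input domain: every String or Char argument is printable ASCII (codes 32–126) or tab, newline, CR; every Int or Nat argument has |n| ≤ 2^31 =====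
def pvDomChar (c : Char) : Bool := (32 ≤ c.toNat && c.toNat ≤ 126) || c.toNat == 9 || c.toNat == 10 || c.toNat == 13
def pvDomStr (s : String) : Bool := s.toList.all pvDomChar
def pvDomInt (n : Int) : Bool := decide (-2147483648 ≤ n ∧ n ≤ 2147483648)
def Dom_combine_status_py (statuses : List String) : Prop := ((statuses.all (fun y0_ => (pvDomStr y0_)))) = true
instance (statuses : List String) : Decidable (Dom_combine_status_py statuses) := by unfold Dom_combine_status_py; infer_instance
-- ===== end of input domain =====

-- B replaces A's three staged all/any scans by one fold keeping the maximum severity rank (alternative decomposition).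

-- ===== PORT A =====
def combine_status_py (statuses : List String) : String :=
  if statuses = [] then "skipped"
  else if statuses.all (fun s => s == "skipped") then "skipped"
  else if statuses.any (fun s => s == "failed" || s == "partial") then "partial"
  else "ok"

-- ===== PORT B =====
-- rank of one status (the if/elif/else in Source B's loop body)
def pvRank (s : String) : Int :=
  if s == "failed" || s == "partial" then 2 else if s == "skipped" then 0 else 1

-- one loop iteration: keep the running maximum
def pvStep (lv : Int) (s : String) : Int :=
  if pvRank s > lv then pvRank s else lv

def combine_status_py_alt (statuses : List String) : String :=
  let level := statuses.foldl pvStep 0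
  -- tuple indexing ("skipped","ok","partial")[level]; level is always 0, 1 or 2
  if level = 0 then "skipped" else if level = 1 then "ok" else "partial"

-- ===== PRECONDITION & SPEC =====
def Spec_combine_status_py (statuses : List String) (out : String) : Prop := out = combine_status_py_alt statuses
instance (statuses : List String) (out : String) : Decidable (Spec_combine_status_py statuses out) := by unfold Spec_combine_status_py; infer_instance

-- ===== CLAIM (what is proved, stated in full; the proofs are below) =====
def Claim_equal_combine_status_py : Prop := ∀ (statuses : List String), Dom_combine_status_py statuses → Spec_combine_status_py statuses (combine_status_py statuses)

-- ===== LEMMAS AND PROOFS =====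

theorem pvStep_eq_max (lv : Int) (s : String) : pvStep lv s = max lv (pvRank s) := by
  unfold pvStep; split <;> omega

theorem pvFold_max (l : List String) : ∀ a b : Int,
    l.foldl pvStep (max a b) = max a (l.foldl pvStep b) := by
  induction l with
  | nil => intro a b; simp
  | cons s t ih =>
    intro a b
    simp only [List.foldl_cons, pvStep_eq_max, max_assoc]
    exact ih a (max b (pvRank s))

theorem pvFold_cons (s : String) (l : List String) :
    (s :: l).foldl pvStep 0 = max (pvRank s) (l.foldl pvStep 0) := by
  have h0 : pvStep 0 s = max (pvRank s) 0 := by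
    rw [pvStep_eq_max]; omega
  simp only [List.foldl_cons, h0]
  exact pvFold_max l (pvRank s) 0

theorem pvFold_nonneg (l : List String) : 0 ≤ l.foldl pvStep 0 := by
  induction l with
  | nil => simp
  | cons s t ih => rw [pvFold_cons]; omega

theorem pvFold_lb (l : List String) (s : String) (hs : s ∈ l) :
    pvRank s ≤ l.foldl pvStep 0 := by
  induction l with
  | nil => cases hs
  | cons x t ih =>
    rw [pvFold_cons]
    rcases List.mem_cons.mp hs with h | h
    · subst h; omega
    · have := ih h; omega

theorem pvFold_ub (l : List String) (c : Int) (hc : 0 ≤ c)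
    (h : ∀ s ∈ l, pvRank s ≤ c) : l.foldl pvStep 0 ≤ c := by
  induction l with
  | nil => simpa
  | cons x t ih =>
    rw [pvFold_cons]
    have h1 := h x (by simp)
    have h2 : t.foldl pvStep 0 ≤ c := ih (fun s hs => h s (List.mem_cons_of_mem _ hs))
    omega

theorem pvRank_le_two (s : String) : pvRank s ≤ 2 := by
  unfold pvRank; split <;> [omega; split <;> omega]

theorem combine_status_py_spec : Claim_equal_combine_status_py := by
  intro statuses _
  unfold Spec_combine_status_py combine_status_py combine_status_py_alt
  by_cases hnil : statuses = []
  · subst hnil; decide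
  · simp only [if_neg hnil]
    by_cases hall : statuses.all (fun s => s == "skipped") = true
    · -- all skipped ⇒ every rank is 0 ⇒ level = 0
      have hlev : statuses.foldl pvStep 0 = 0 := by
        have hub : statuses.foldl pvStep 0 ≤ 0 := by
          apply pvFold_ub _ _ le_rfl
          intro s hs
          have : s = "skipped" := by simpa using List.all_eq_true.mp hall s hs
          simp [this, pvRank]
        have := pvFold_nonneg statuses
        omega
      simp [hall, hlev]
    · by_cases hany : statuses.any (fun s => s == "failed" || s == "partial") = true
      · -- some failed/partial ⇒ level = 2
        obtain ⟨s, hs, hp⟩ := List.any_eq_true.mp hany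
        have hr2 : pvRank s = 2 := by unfold pvRank; simp [hp]
        have hlev : statuses.foldl pvStep 0 = 2 := by
          have hlb := pvFold_lb statuses s hs
          have hub : statuses.foldl pvStep 0 ≤ 2 :=
            pvFold_ub _ _ (by omega) (fun t _ => pvRank_le_two t)
          omega
        simp [hall, hany, hlev]
      · -- nonempty, not all skipped, no failed/partial ⇒ level = 1
        have hnot2 : ∀ s ∈ statuses, pvRank s ≤ 1 := by
          intro s hs
          have hnp : (s == "failed" || s == "partial") = false := by
            cases h : (s == "failed" || s == "partial") with
            | false => rfl
            | true => exact absurd (List.any_eq_true.mpr ⟨s, hs, h⟩) hany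
          unfold pvRank
          simp only [hnp, Bool.false_eq_true, if_false]
          split <;> omega
        obtain ⟨s, hs, hns⟩ : ∃ s ∈ statuses, ¬ (s == "skipped") = true := by
          by_contra hc
          push_neg at hc
          exact hall (List.all_eq_true.mpr (fun s hs => by simpa using hc s hs))
        have hr1 : pvRank s = 1 := by
          unfold pvRank
          have hnp : (s == "failed" || s == "partial") = false := by
            cases h : (s == "failed" || s == "partial") with
            | false => rfl
            | true => exact absurd (List.any_eq_true.mpr ⟨s, hs, h⟩) hany
          simp only [hnp, Bool.false_eq_true, if_false]
          simp [Bool.eq_false_iff.mpr hns]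
        have hlev : statuses.foldl pvStep 0 = 1 := by
          have hlb := pvFold_lb statuses s hs
          have hub := pvFold_ub statuses 1 (by omega) hnot2
          omega
        simp [hall, hany, hlev]
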